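-- pv_equiv track=rewrite | github.com/pypi-data/pypi-mirror-298 | packages/fluid-sbom/fluid_sbom-1.1.0.tar.gz/fluid_sbom-1.1.0/fluid_sbom/pkg/cataloger/python/parse_requirements.py | get_dep_version_range
-- ===== SOURCE A (Python) =====
-- def get_dep_version_range(dep_specs: list[tuple[str, str]]) -> str:
--     version_range = ""
--     for operator, version in dep_specs:
--         if operator in {"==", "~="}:
--             version_range = version
--             break
--         version_range += f"{operator}{version} "
--     return version_range.rstrip()
-- ===== SOURCE B (Python) =====
-- def get_dep_version_range(dep_specs: list[tuple[str, str]]) -> str: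
--     pinned = next((version for operator, version in dep_specs
--                    if operator in ("==", "~=")), None)
--     if pinned is not None:
--         return pinned.rstrip()
--     return " ".join(f"{operator}{version}" for operator, version in dep_specs).rstrip()
-- ===== Notes on version B (the rewrite author's own statement) =====
-- stated objective: simpler
-- what changed: Replaces A's accumulate-then-discard loop (building a string that a pin throws away) with an explicit search for the first '=='/'~=' spec followed by a branch: return that version, else join all specs with spaces.
import Mathlib
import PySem

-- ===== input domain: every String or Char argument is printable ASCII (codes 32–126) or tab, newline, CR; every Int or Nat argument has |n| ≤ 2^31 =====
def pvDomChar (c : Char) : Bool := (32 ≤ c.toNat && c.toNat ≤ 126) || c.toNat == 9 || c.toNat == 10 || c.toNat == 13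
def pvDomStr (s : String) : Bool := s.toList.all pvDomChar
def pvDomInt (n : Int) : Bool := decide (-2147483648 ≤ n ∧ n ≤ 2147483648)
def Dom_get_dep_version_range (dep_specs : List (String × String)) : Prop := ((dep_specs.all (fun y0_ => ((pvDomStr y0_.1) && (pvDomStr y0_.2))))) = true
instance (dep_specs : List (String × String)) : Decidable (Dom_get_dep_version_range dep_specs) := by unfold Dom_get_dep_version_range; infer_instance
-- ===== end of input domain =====

-- B replaces A's accumulate-then-discard loop with a search for the first '=='/'~=' spec,
-- then either returns that version or joins all specs with spaces (objective: simpler).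


-- ===== PORT A =====
-- the for-loop with break, carrying the accumulated 'version_range' characters
def pvAloop : List (String × String) → List Char → List Char
  | [], acc => acc
  | (op, v) :: rest, acc =>
    if op = "==" || op = "~=" then v.toList
    else pvAloop rest (acc ++ (op.toList ++ v.toList ++ [' ']))

def get_dep_version_range (dep_specs : List (String × String)) : String :=
  String.mk (PySem.Chars.rstrip (pvAloop dep_specs []))

-- ===== PORT B =====
-- next((version for op, version in dep_specs if op in ("==", "~=")), None)
def pvFindPinned : List (String × String) → Option String
  | [] => none
  | (op, v) :: rest => if op = "==" || op = "~=" then some v else pvFindPinned rest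

def get_dep_version_range_alt (dep_specs : List (String × String)) : String :=
  match pvFindPinned dep_specs with
  | some v => String.mk (PySem.Chars.rstrip v.toList)
  | none =>
    String.mk (PySem.Chars.rstrip
      (PySem.Chars.join [' '] (dep_specs.map (fun p => p.1.toList ++ p.2.toList))))

-- ===== PRECONDITION & SPEC =====
def Spec_get_dep_version_range (dep_specs : List (String × String)) (out : String) : Prop := out = get_dep_version_range_alt dep_specs
instance (dep_specs : List (String × String)) (out : String) : Decidable (Spec_get_dep_version_range dep_specs out) := by unfold Spec_get_dep_version_range; infer_instance

-- ===== CLAIM (what is proved, stated in full; the proofs are below) =====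
def Claim_equal_get_dep_version_range : Prop := ∀ (dep_specs : List (String × String)), Dom_get_dep_version_range dep_specs → Spec_get_dep_version_range dep_specs (get_dep_version_range dep_specs)

-- ===== LEMMAS AND PROOFS =====

-- if a pin exists, A's loop discards the accumulator and returns that version
theorem pvAloop_of_pinned : ∀ (ds : List (String × String)) (v : String) (acc : List Char),
    pvFindPinned ds = some v → pvAloop ds acc = v.toList := by
  intro ds
  induction ds with
  | nil => intro v acc h; simp [pvFindPinned] at h
  | cons p rest ih =>
    intro v acc h
    obtain ⟨op, w⟩ := p
    by_cases hop : (op = "==" || op = "~=") = true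
    · simp [pvFindPinned, hop] at h
      simp [pvAloop, hop, h]
    · simp [pvFindPinned, hop] at h
      simpa [pvAloop, hop] using ih v _ h

-- if no pin exists, A's loop appends every "op ++ v ++ ' '" block to the accumulator
theorem pvAloop_of_none : ∀ (ds : List (String × String)) (acc : List Char),
    pvFindPinned ds = none →
    pvAloop ds acc = acc ++ ((ds.map (fun p => p.1.toList ++ p.2.toList ++ [' '])).flatten) := by
  intro ds
  induction ds with
  | nil => intro acc _; simp [pvAloop]
  | cons p rest ih =>
    intro acc h
    obtain ⟨op, w⟩ := p
    by_cases hop : (op = "==" || op = "~=") = true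
    · simp [pvFindPinned, hop] at h
    · simp [pvFindPinned, hop] at h
      simp [pvAloop, hop, ih _ h, List.append_assoc]

-- a trailing space does not change rstrip
theorem rstrip_append_space (s : List Char) :
    PySem.Chars.rstrip (s ++ [' ']) = PySem.Chars.rstrip s := by
  have : PySem.Chars.isspace ' ' = true := by decide
  simp [PySem.Chars.rstrip, List.dropWhile, this]

theorem intercalate_cons_cons' (sep a b : List Char) (l : List (List Char)) :
    sep.intercalate (a :: b :: l) = a ++ sep ++ sep.intercalate (b :: l) := by
  simp [List.intercalate, List.intersperse]

-- flattening the space-terminated blocks = intercalating, plus one trailing space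
theorem flatten_blocks : ∀ (l : List (List Char)), l ≠ [] →
    (l.map (· ++ [' '])).flatten = List.intercalate [' '] l ++ [' '] := by
  intro l
  induction l with
  | nil => intro h; exact absurd rfl h
  | cons a rest ih =>
    intro _
    cases rest with
    | nil => simp [List.intercalate]
    | cons b r =>
      rw [List.map_cons, List.flatten_cons, ih (by simp), intercalate_cons_cons']
      simp [List.append_assoc]

-- ===== VERDICT (by name: the statement is the Claim_ definition above) =====
theorem get_dep_version_range_spec : Claim_equal_get_dep_version_range := by
  unfold Claim_equal_get_dep_version_range
  intro ds _
  unfold Spec_get_dep_version_range get_dep_version_range get_dep_version_range_alt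
  cases hf : pvFindPinned ds with
  | some v => rw [pvAloop_of_pinned ds v [] hf]
  | none =>
    rw [pvAloop_of_none ds [] hf, List.nil_append]
    cases hds : ds with
    | nil => simp [PySem.Chars.join, List.intercalate]
    | cons p rest =>
      have hne : (ds.map (fun p => p.1.toList ++ p.2.toList)) ≠ [] := by simp [hds]
      have : (ds.map (fun p => p.1.toList ++ p.2.toList ++ [' '])).flatten
          = (( (ds.map (fun p => p.1.toList ++ p.2.toList)).map (· ++ [' '])).flatten) := by
        simp [List.map_map, Function.comp_def, List.append_assoc]
      rw [hds] at *
      rw [this, flatten_blocks _ hne, rstrip_append_space]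
      rfl
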